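-- pv_equiv track=rewrite | github.com/DragynSlayr/CPSC231-Reversi | team_tasks/task8/MoveValidator.py | getIdentifierOfCorner
-- ===== SOURCE A (Python) =====
-- def getIdentifierOfCorner(corner_index, order_index):
--     if order_index == 1:
--         if corner_index % 2 == 1:
--             return "R"
--         else:
--             return "L"
--     elif order_index == 2:
--         if corner_index <= 2:
--             return "B"
--         else:
--             return "T"
--     else:
--         #Return a combination of T or B and R or L
--         return getIdentifierOfCorner(corner_index, 2) + getIdentifierOfCorner(corner_index, 1)
-- ===== SOURCE B (Python) =====
-- def getIdentifierOfCorner(corner_index, order_index):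
--     # Look up the full two-letter identifier in a table indexed by the
--     # corner's parity and half, then slice out the requested component.
--     full = ["BL", "BR", "TL", "TR"][corner_index % 2 + (0 if corner_index <= 2 else 2)]
--     if order_index == 1:
--         return full[1:]
--     if order_index == 2:
--         return full[:1]
--     return full
-- ===== Notes on version B (the rewrite author's own statement) =====
-- stated objective: alternative
-- what changed: Replaces A's conditional branches and self-recursion by a table lookup: the full two-letter identifier is fetched from a 4-entry table indexed arithmetically by parity and half, and the requested component is obtained by string slicing instead of separate conditionals.
import Mathlib
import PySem

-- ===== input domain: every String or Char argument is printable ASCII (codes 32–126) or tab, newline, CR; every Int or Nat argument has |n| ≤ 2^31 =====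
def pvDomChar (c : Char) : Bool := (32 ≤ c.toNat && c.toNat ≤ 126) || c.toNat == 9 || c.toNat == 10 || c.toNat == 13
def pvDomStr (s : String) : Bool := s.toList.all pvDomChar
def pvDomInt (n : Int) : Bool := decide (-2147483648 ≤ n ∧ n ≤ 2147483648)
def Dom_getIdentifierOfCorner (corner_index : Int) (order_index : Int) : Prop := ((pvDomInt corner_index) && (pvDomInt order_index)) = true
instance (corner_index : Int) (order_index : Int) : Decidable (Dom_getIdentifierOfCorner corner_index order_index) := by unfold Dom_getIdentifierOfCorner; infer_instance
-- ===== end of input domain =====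

-- ===== PORT A =====
-- A's self-recursion (order_index ∉ {1,2} calls itself at 2 and 1) transliterated with a measure.
def getIdentifierOfCorner (corner_index : Int) (order_index : Int) : String :=
  if order_index = 1 then
    (if PySem.Int.mod corner_index 2 = 1 then "R" else "L")
  else if order_index = 2 then
    (if corner_index ≤ 2 then "B" else "T")
  else
    getIdentifierOfCorner corner_index 2 ++ getIdentifierOfCorner corner_index 1
termination_by (if order_index = 1 ∨ order_index = 2 then 0 else 1 : Nat)
decreasing_by
  · simp_all
  · simp_all

-- ===== PORT B =====
-- B: 4-entry table lookup by parity/half, components extracted by slicing (header objective: alternative).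
def getIdentifierOfCorner_alt (corner_index : Int) (order_index : Int) : String :=
  let full := (PySem.List.pyGet? (["BL", "BR", "TL", "TR"] : List String)
      (PySem.Int.mod corner_index 2 + (if corner_index ≤ 2 then 0 else 2))).getD ""
  if order_index = 1 then PySem.Str.slice full (some 1) none
  else if order_index = 2 then PySem.Str.slice full none (some 1)
  else full

-- ===== PRECONDITION & SPEC =====
def Spec_getIdentifierOfCorner (corner_index : Int) (order_index : Int) (out : String) : Prop := out = getIdentifierOfCorner_alt corner_index order_index
instance (corner_index : Int) (order_index : Int) (out : String) : Decidable (Spec_getIdentifierOfCorner corner_index order_index out) := by unfold Spec_getIdentifierOfCorner; infer_instance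

-- ===== CLAIM (what is proved, stated in full; the proofs are below) =====
def Claim_equal_getIdentifierOfCorner : Prop := ∀ (corner_index : Int) (order_index : Int), Dom_getIdentifierOfCorner corner_index order_index → Spec_getIdentifierOfCorner corner_index order_index (getIdentifierOfCorner corner_index order_index)

-- ===== LEMMAS AND PROOFS =====
theorem getId_at_one (c : Int) :
    getIdentifierOfCorner c 1 = (if PySem.Int.mod c 2 = 1 then "R" else "L") := by
  rw [getIdentifierOfCorner]; simp

theorem getId_at_two (c : Int) :
    getIdentifierOfCorner c 2 = (if c ≤ 2 then "B" else "T") := by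
  rw [getIdentifierOfCorner]; norm_num

-- ===== VERDICT (by name: the statement is the Claim_ definition above) =====
theorem getIdentifierOfCorner_spec : Claim_equal_getIdentifierOfCorner := by
  intro c o _
  unfold Spec_getIdentifierOfCorner
  rw [getIdentifierOfCorner, getIdentifierOfCorner_alt]
  rcases PySem.Int.mod_two_eq c with hm | hm <;>
    by_cases hc : c ≤ 2 <;>
      simp only [hm, hc, getId_at_one, getId_at_two] <;>
        split_ifs <;>
          simp_all [PySem.List.pyGet?, PySem.List.pyIdx?, PySem.Str.slice] <;> decide
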